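-- pv_equiv track=rewrite | github.com/sunnydaisy/cs-algorithm | CHOI_algorithm/sk/1.py | solution
-- ===== SOURCE A (Python) =====
-- def solution(p):
--     answer = [0] * len(p)
--     # report = [0] * 1001
--
--     tmp = p.copy()
--     i = 0
--     n = len(p)
--     while i < n:
--         pivot = [p[i], i]
--         min_num = [int(1e9), -1]
--
--         for j in range(i+1, n):
--             if p[j] < min_num[0]:
--                 min_num = [p[j], j]
--
--         if pivot[0] > min_num[0]:
--             answer[pivot[1]] += 1
--             answer[min_num[1]] += 1
--             p[pivot[1]], p[min_num[1]] = p[min_num[1]], p[pivot[1]]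
--         i += 1
--
--
--     return answer
-- ===== SOURCE B (Python) =====
-- # Replays selection sort's swaps, but finds each suffix minimum with a
-- # segment tree (range-min with point updates) instead of rescanning;
-- # no 1e9 sentinel, so it is correct for elements above 10**9.
-- # Note: unlike A, it does not mutate the argument list.
--
-- def _mn(x, y):
--     # lexicographic min of two (value, index) pairs; ties keep the left one
--     return x if x <= y else y
--
--
-- def _build(a, lo, hi):
--     # segment tree node for a[lo:hi] as (min_pair, left_child, right_child)
--     if hi - lo == 1:
--         return ((a[lo], lo), None, None)
--     mid = (lo + hi) // 2
--     left = _build(a, lo, mid)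
--     right = _build(a, mid, hi)
--     return (_mn(left[0], right[0]), left, right)
--
--
-- def _query(t, lo, hi, l, r):
--     # min pair over a[l:r]; requires [l,r) to intersect [lo,hi)
--     if l <= lo and hi <= r:
--         return t[0]
--     mid = (lo + hi) // 2
--     if r <= mid:
--         return _query(t[1], lo, mid, l, r)
--     if mid <= l:
--         return _query(t[2], mid, hi, l, r)
--     return _mn(_query(t[1], lo, mid, l, r), _query(t[2], mid, hi, l, r))
--
--
-- def _update(t, lo, hi, k, v):
--     # functional point update: leaf k becomes v
--     if hi - lo == 1:
--         return (v, None, None)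
--     mid = (lo + hi) // 2
--     if k < mid:
--         left = _update(t[1], lo, mid, k, v)
--         right = t[2]
--     else:
--         left = t[1]
--         right = _update(t[2], mid, hi, k, v)
--     return (_mn(left[0], right[0]), left, right)
--
--
-- def solution(p):
--     n = len(p)
--     answer = [0] * n
--     if n == 0:
--         return answer
--     a = list(p)
--     t = _build(a, 0, n)
--     for i in range(n - 1):
--         mv, mj = _query(t, 0, n, i + 1, n)
--         if a[i] > mv:
--             answer[i] += 1
--             answer[mj] += 1
--             a[i], a[mj] = mv, a[i]
--             t = _update(t, 0, n, i, (a[i], i))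
--             t = _update(t, 0, n, mj, (a[mj], mj))
--     return answer
-- ===== Notes on version B (the rewrite author's own statement) =====
-- stated objective: faster
-- what changed: B replays selection sort's swap sequence but finds each suffix minimum with a functional segment tree (range-min query + point updates) instead of rescanning the suffix, and drops A's 1e9 sentinel so elements above 10**9 are handled correctly; B also does not mutate the argument list (A sorts p in place).
-- intended difference: On lists containing an element greater than 10**9, A's sentinel min initialisation [int(1e9), -1] masks the real suffix minimum, so A skips the right swap, swaps with index -1 (wraparound to the last position) and always adds a spurious 2 to the last position's count; B performs the genuine selection-sort swaps and returns the intended counts (e.g. on [2000000000] A returns [2], B returns [0]). — e.g. on solution([2000000000]): A returns [2], B returns [0]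
import Mathlib
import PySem

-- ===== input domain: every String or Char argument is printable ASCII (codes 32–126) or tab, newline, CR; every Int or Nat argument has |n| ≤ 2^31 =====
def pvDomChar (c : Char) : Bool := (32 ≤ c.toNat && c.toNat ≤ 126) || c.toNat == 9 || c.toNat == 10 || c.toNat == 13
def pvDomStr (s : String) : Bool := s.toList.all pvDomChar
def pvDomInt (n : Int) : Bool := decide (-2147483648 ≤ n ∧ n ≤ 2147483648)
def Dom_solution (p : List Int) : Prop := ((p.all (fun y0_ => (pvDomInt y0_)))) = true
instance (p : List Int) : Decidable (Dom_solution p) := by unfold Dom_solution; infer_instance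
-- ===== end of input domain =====

-- B replaces A's quadratic suffix rescans by a segment tree and drops A's 1e9
-- sentinel (objective: faster, O(n log n) vs O(n^2); measured).
-- NOTE: Python A sorts its argument list p in place; the equivalence proved here
-- is about the RETURN value only (B does not mutate p).

-- ===== PORT A =====
-- body of the inner 'for j in range(i+1, n)' loop: running-minimum update
def aInnerF (p : List Int) (mn : Int × Int) (j : Int) : Int × Int :=
  if PySem.List.pyGetD p j 0 < mn.1 then (PySem.List.pyGetD p j 0, j) else mn

-- the inner loop itself, started from A's sentinel [int(1e9), -1]
def solAInner (p : List Int) (i n : Int) : Int × Int :=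
  (PySem.List.pyRange (i + 1) n 1).foldl (aInnerF p) (1000000000, -1)

-- body of 'while i < n' (i goes up by one each pass, so the loop is a fold over
-- range(n)); state = (p, answer); the simultaneous swap assignment reads both old
-- values first; pyGetD/pySetD give Python's negative-index wraparound (every index
-- that occurs is in range, including min_num[1] = -1, so the defaults are never used)
def solAStep (st : List Int × List Int) (i : Int) : List Int × List Int :=
  let p := st.1
  let answer := st.2
  let n : Int := (p.length : Int)
  let pivot : Int × Int := (PySem.List.pyGetD p i 0, i)
  let min_num : Int × Int := solAInner p i n
  if pivot.1 > min_num.1 then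
    let a1 := PySem.List.pySetD answer pivot.2 (PySem.List.pyGetD answer pivot.2 0 + 1)
    let a2 := PySem.List.pySetD a1 min_num.2 (PySem.List.pyGetD a1 min_num.2 0 + 1)
    let v1 := PySem.List.pyGetD p min_num.2 0
    let v2 := PySem.List.pyGetD p pivot.2 0
    let p1 := PySem.List.pySetD p pivot.2 v1
    let p2 := PySem.List.pySetD p1 min_num.2 v2
    (p2, a2)
  else (p, answer)

def solution (p : List Int) : List Int :=
  ((PySem.List.pyRange 0 (p.length : Int) 1).foldl solAStep
    (p, List.replicate p.length 0)).2

-- ===== PORT B =====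
-- Source B's nested-tuple segment-tree node (min pair, left child, right child)
inductive SegTree where
  | leaf : Int × Nat → SegTree
  | node : Int × Nat → SegTree → SegTree → SegTree
deriving Repr

def stTop : SegTree → Int × Nat
  | SegTree.leaf v => v
  | SegTree.node v _ _ => v

-- Source B's _mn: lexicographic minimum of two (value, index) pairs, ties keep the left;
-- indices are list positions, hence Nat
def mnP (x y : Int × Nat) : Int × Nat :=
  if x.1 < y.1 ∨ (x.1 = y.1 ∧ x.2 ≤ y.2) then x else y

-- Source B's _build; the fuel argument only makes the range recursion structural
-- (any fuel ≥ hi - lo computes _build; the callers pass n)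
def stBuild (fuel : Nat) (a : List Int) (lo hi : Nat) : SegTree :=
  match fuel with
  | 0 => SegTree.leaf (a.getD lo 0, lo)
  | fuel + 1 =>
    if hi ≤ lo + 1 then SegTree.leaf (a.getD lo 0, lo)
    else
      let mid := (lo + hi) / 2
      let L := stBuild fuel a lo mid
      let R := stBuild fuel a mid hi
      SegTree.node (mnP (stTop L) (stTop R)) L R

-- Source B's _query (structural on the tree; the leaf fallthrough is unreachable on valid calls)
def stQuery (t : SegTree) (lo hi l r : Nat) : Int × Nat :=
  if l ≤ lo ∧ hi ≤ r then stTop t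
  else
    match t with
    | SegTree.leaf v => v
    | SegTree.node _ L R =>
      let mid := (lo + hi) / 2
      if r ≤ mid then stQuery L lo mid l r
      else if mid ≤ l then stQuery R mid hi l r
      else mnP (stQuery L lo mid l r) (stQuery R mid hi l r)

-- Source B's _update (functional path rebuild; 'hi - lo == 1' holds exactly at the leaves)
def stUpdate (t : SegTree) (lo hi k : Nat) (v : Int × Nat) : SegTree :=
  match t with
  | SegTree.leaf _ => SegTree.leaf v
  | SegTree.node _ L R =>
    let mid := (lo + hi) / 2
    if k < mid then
      let L2 := stUpdate L lo mid k v
      SegTree.node (mnP (stTop L2) (stTop R)) L2 R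
    else
      let R2 := stUpdate R mid hi k v
      SegTree.node (mnP (stTop L) (stTop R2)) L R2

-- body of Source B's 'for i in range(n - 1)'; state = (answer, a, t); every list index
-- used is in range and nonnegative, so plain getD/set are exact here
def solBStep (n : Nat) (st : List Int × List Int × SegTree) (i : Nat) :
    List Int × List Int × SegTree :=
  let answer := st.1
  let a := st.2.1
  let t := st.2.2
  let m := stQuery t 0 n (i + 1) n
  if a.getD i 0 > m.1 then
    let answer' := answer.set i (answer.getD i 0 + 1)
    let answer'' := answer'.set m.2 (answer'.getD m.2 0 + 1)
    let ai := a.getD i 0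
    let a' := (a.set i m.1).set m.2 ai
    let t' := stUpdate t 0 n i (m.1, i)
    let t'' := stUpdate t' 0 n m.2 (ai, m.2)
    (answer'', a', t'')
  else st

def solution_alt (p : List Int) : List Int :=
  let n := p.length
  let answer : List Int := List.replicate n 0
  if n = 0 then answer
  else ((List.range (n - 1)).foldl (solBStep n) (answer, p, stBuild n p 0 n)).1

-- ===== PRECONDITION & SPEC =====
-- On lists containing an element greater than 10**9, A's sentinel min initialisation
-- [int(1e9), -1] masks the real suffix minimum, so A skips the right swap, swaps with
-- index -1 (Python wraparound to the last position) and adds a spurious 2 to the last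
-- position's count; B performs the genuine selection-sort swaps and returns the
-- intended counts (on [2000000000] A returns [2], B returns [0]).
def D_solution (p : List Int) : Prop := ∃ x ∈ p, 1000000000 < x
instance (p : List Int) : Decidable (D_solution p) := by unfold D_solution; infer_instance

def Spec_solution (p : List Int) (out : List Int) : Prop := ¬ D_solution p → out = solution_alt p
instance (p : List Int) (out : List Int) : Decidable (Spec_solution p out) := by unfold Spec_solution; infer_instance

def pvDiffWitness_solution : List Int := [2000000000]
def pvDiffWitnessOut_solution : (List Int) × (List Int) := ([2], [0])

-- ===== CLAIM (what is proved, stated in full; the proofs are below) =====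
def Claim_unchanged_solution : Prop := ∀ (p : List Int), Dom_solution p → Spec_solution p (solution p)
def Claim_changed_solution : Prop := Dom_solution (pvDiffWitness_solution) ∧ D_solution (pvDiffWitness_solution) ∧ solution (pvDiffWitness_solution) = pvDiffWitnessOut_solution.1 ∧ solution_alt (pvDiffWitness_solution) = pvDiffWitnessOut_solution.2 ∧ pvDiffWitnessOut_solution.1 ≠ pvDiffWitnessOut_solution.2

-- ===== LEMMAS AND PROOFS =====

theorem mnP_cases (x y : Int × Nat) : mnP x y = x ∨ mnP x y = y := by
  unfold mnP; split_ifs <;> simp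

theorem mnP_assoc (x y z : Int × Nat) : mnP (mnP x y) z = mnP x (mnP y z) := by
  unfold mnP
  split_ifs <;> first | rfl | (exfalso; omega)

-- specification device for the proofs: first minimum (value, index) of a[lo..lo+c]
def fmin (a : List Int) (lo : Nat) : Nat → Int × Nat
  | 0 => (a.getD lo 0, lo)
  | c + 1 => mnP (a.getD lo 0, lo) (fmin a (lo + 1) c)

theorem fmin_idx (a : List Int) : ∀ (c lo : Nat), lo ≤ (fmin a lo c).2 ∧ (fmin a lo c).2 ≤ lo + c := by
  intro c
  induction c with
  | zero => intro lo; simp [fmin]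
  | succ c ih =>
    intro lo
    have h := ih (lo + 1)
    show lo ≤ (mnP (a.getD lo 0, lo) (fmin a (lo + 1) c)).2 ∧
      (mnP (a.getD lo 0, lo) (fmin a (lo + 1) c)).2 ≤ lo + (c + 1)
    rcases mnP_cases (a.getD lo 0, lo) (fmin a (lo + 1) c) with hc | hc <;>
      rw [hc] <;> constructor <;> omega

theorem fmin_val (a : List Int) : ∀ (c lo : Nat), (fmin a lo c).1 = a.getD (fmin a lo c).2 0 := by
  intro c
  induction c with
  | zero => intro lo; simp [fmin]
  | succ c ih =>
    intro lo
    show (mnP (a.getD lo 0, lo) (fmin a (lo + 1) c)).1 = a.getD (mnP (a.getD lo 0, lo) (fmin a (lo + 1) c)).2 0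
    rcases mnP_cases (a.getD lo 0, lo) (fmin a (lo + 1) c) with hc | hc <;>
      rw [hc]
    · exact ih (lo + 1)

theorem fmin_split (a : List Int) : ∀ (c1 c2 lo : Nat),
    fmin a lo (c1 + c2 + 1) = mnP (fmin a lo c1) (fmin a (lo + c1 + 1) c2) := by
  intro c1
  induction c1 with
  | zero => intro c2 lo; simp [fmin]
  | succ c1 ih =>
    intro c2 lo
    have h1 : c1 + 1 + c2 + 1 = (c1 + c2 + 1) + 1 := by omega
    rw [h1]
    show mnP (a.getD lo 0, lo) (fmin a (lo + 1) (c1 + c2 + 1)) = _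
    rw [ih c2 (lo + 1), ← mnP_assoc]
    have h2 : lo + 1 + c1 + 1 = lo + (c1 + 1) + 1 := by omega
    rw [h2]
    rfl

theorem stBuild_top (a : List Int) : ∀ (fuel lo hi : Nat), lo < hi → hi - lo ≤ fuel →
    stTop (stBuild fuel a lo hi) = fmin a lo (hi - lo - 1) := by
  intro fuel
  induction fuel with
  | zero => intro lo hi h1 h2; omega
  | succ fuel ih =>
    intro lo hi h1 h2
    by_cases hle : hi ≤ lo + 1
    · have : hi - lo - 1 = 0 := by omega
      simp only [stBuild, if_pos hle, this, stTop, fmin]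
    · have hmid1 : lo < (lo + hi) / 2 := by omega
      have hmid2 : (lo + hi) / 2 < hi := by omega
      simp only [stBuild, if_neg hle, stTop]
      show mnP (stTop (stBuild fuel a lo ((lo + hi) / 2))) (stTop (stBuild fuel a ((lo + hi) / 2) hi))
            = fmin a lo (hi - lo - 1)
      rw [ih lo ((lo + hi) / 2) hmid1 (by omega), ih ((lo + hi) / 2) hi hmid2 (by omega)]
      have h := fmin_split a ((lo + hi) / 2 - lo - 1) (hi - (lo + hi) / 2 - 1) lo
      rw [show (lo + hi) / 2 - lo - 1 + (hi - (lo + hi) / 2 - 1) + 1 = hi - lo - 1 by omega,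
          show lo + ((lo + hi) / 2 - lo - 1) + 1 = (lo + hi) / 2 by omega] at h
      exact h.symm

theorem stQuery_build (a : List Int) : ∀ (fuel lo hi l r : Nat), lo < hi → hi - lo ≤ fuel →
    max l lo < min r hi →
    stQuery (stBuild fuel a lo hi) lo hi l r = fmin a (max l lo) (min r hi - max l lo - 1) := by
  intro fuel
  induction fuel with
  | zero => intro lo hi l r h1 h2; omega
  | succ fuel ih =>
    intro lo hi l r h1 h2 hov
    by_cases hcov : l ≤ lo ∧ hi ≤ r
    · rw [stQuery.eq_def, if_pos hcov, stBuild_top a (fuel + 1) lo hi h1 h2]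
      rw [show max l lo = lo by omega, show min r hi = hi by omega]
    · rw [stQuery.eq_def, if_neg hcov]
      by_cases hle : hi ≤ lo + 1
      · exact absurd (by omega : l ≤ lo ∧ hi ≤ r) hcov
      · simp only [stBuild, if_neg hle]
        have hmid1 : lo < (lo + hi) / 2 := by omega
        have hmid2 : (lo + hi) / 2 < hi := by omega
        by_cases hr : r ≤ (lo + hi) / 2
        · simp only [if_pos hr]
          rw [ih lo ((lo + hi) / 2) l r hmid1 (by omega) (by omega)]
          rw [show min r ((lo + hi) / 2) = min r hi by omega]
        · simp only [if_neg hr]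
          by_cases hl : (lo + hi) / 2 ≤ l
          · simp only [if_pos hl]
            rw [ih ((lo + hi) / 2) hi l r hmid2 (by omega) (by omega)]
            rw [show max l ((lo + hi) / 2) = max l lo by omega]
          · simp only [if_neg hl]
            rw [ih lo ((lo + hi) / 2) l r hmid1 (by omega) (by omega),
                ih ((lo + hi) / 2) hi l r hmid2 (by omega) (by omega)]
            have h := fmin_split a (min r ((lo + hi) / 2) - max l lo - 1)
              (min r hi - max l ((lo + hi) / 2) - 1) (max l lo)
            rw [show min r ((lo + hi) / 2) - max l lo - 1 + (min r hi - max l ((lo + hi) / 2) - 1) + 1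
                  = min r hi - max l lo - 1 by omega,
                show max l lo + (min r ((lo + hi) / 2) - max l lo - 1) + 1 = (lo + hi) / 2 by omega,
                show max l ((lo + hi) / 2) = (lo + hi) / 2 by omega] at h
            rw [show max l ((lo + hi) / 2) = (lo + hi) / 2 by omega]
            exact h.symm

theorem stBuild_congr (a b : List Int) : ∀ (fuel lo hi : Nat), lo < hi →
    (∀ j, lo ≤ j → j < hi → a.getD j 0 = b.getD j 0) →
    stBuild fuel a lo hi = stBuild fuel b lo hi := by
  intro fuel
  induction fuel with
  | zero =>
    intro lo hi h1 hag
    simp only [stBuild]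
    rw [hag lo (by omega) (by omega)]
  | succ fuel ih =>
    intro lo hi h1 hag
    by_cases hle : hi ≤ lo + 1
    · simp only [stBuild, if_pos hle]
      rw [hag lo (by omega) (by omega)]
    · simp only [stBuild, if_neg hle]
      have hmid1 : lo < (lo + hi) / 2 := by omega
      have hmid2 : (lo + hi) / 2 < hi := by omega
      rw [ih lo ((lo + hi) / 2) hmid1 (fun j hj1 hj2 => hag j hj1 (by omega)),
          ih ((lo + hi) / 2) hi hmid2 (fun j hj1 hj2 => hag j (by omega) hj2)]

theorem getD_set_self (a : List Int) (k : Nat) (v : Int) (h : k < a.length) :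
    (a.set k v).getD k 0 = v := by
  rw [List.getD_eq_getElem _ _ (by simpa using h)]
  simp [List.getElem_set_self]

theorem getD_set_ne (a : List Int) (k j : Nat) (v : Int) (h : j ≠ k) :
    (a.set k v).getD j 0 = a.getD j 0 := by
  simp [List.getD, List.getElem?_set_ne (Ne.symm h)]

theorem stUpdate_build (a : List Int) : ∀ (fuel lo hi k : Nat) (v : Int),
    lo ≤ k → k < hi → hi - lo ≤ fuel → hi ≤ a.length →
    stUpdate (stBuild fuel a lo hi) lo hi k (v, k) = stBuild fuel (a.set k v) lo hi := by
  intro fuel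
  induction fuel with
  | zero => intro lo hi k v h1 h2 h3 h4; omega
  | succ fuel ih =>
    intro lo hi k v h1 h2 h3 h4
    by_cases hle : hi ≤ lo + 1
    · have hk : k = lo := by omega
      simp only [stBuild, if_pos hle, stUpdate]
      rw [hk, getD_set_self a lo v (by omega)]
    · simp only [stBuild, if_neg hle, stUpdate]
      have hmid1 : lo < (lo + hi) / 2 := by omega
      have hmid2 : (lo + hi) / 2 < hi := by omega
      by_cases hk : k < (lo + hi) / 2
      · simp only [if_pos hk]
        rw [ih lo ((lo + hi) / 2) k v h1 hk (by omega) (by omega),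
            stBuild_congr a (a.set k v) fuel ((lo + hi) / 2) hi hmid2
              (fun j hj1 hj2 => (getD_set_ne a k j v (by omega)).symm)]
      · simp only [if_neg hk]
        rw [ih ((lo + hi) / 2) hi k v (by omega) h2 (by omega) h4,
            stBuild_congr a (a.set k v) fuel lo ((lo + hi) / 2) hmid1
              (fun j hj1 hj2 => (getD_set_ne a k j v (by omega)).symm)]

theorem pyRange_natNat (lo hi : Nat) :
    PySem.List.pyRange (lo : Int) (hi : Int) 1 = (List.range' lo (hi - lo)).map (fun k => Int.ofNat k) := by
  rw [PySem.List.pyRange_one, show ((hi : Int) - (lo : Int)).toNat = hi - lo by omega,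
      List.range'_eq_map_range, List.map_map]
  apply List.map_congr_left
  intro k _
  simp

theorem afold (p : List Int) : ∀ (c lo : Nat) (acc : Int × Int),
    ((List.range' lo (c + 1)).map (fun k => Int.ofNat k)).foldl (aInnerF p) acc
      = if (fmin p lo c).1 < acc.1 then ((fmin p lo c).1, ((fmin p lo c).2 : Int)) else acc := by
  intro c
  induction c with
  | zero =>
    intro lo acc
    show aInnerF p acc (Int.ofNat lo) = _
    simp only [aInnerF, fmin, Int.ofNat_eq_natCast, PySem.List.pyGetD_natCast]
  | succ c ih =>
    intro lo acc
    rw [show c + 1 + 1 = (c + 1) + 1 by rfl, List.range'_succ, List.map_cons, List.foldl_cons,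
        ih (lo + 1) (aInnerF p acc (Int.ofNat lo))]
    have hlb := (fmin_idx p c (lo + 1)).1
    show _ = if (mnP (p.getD lo 0, lo) (fmin p (lo + 1) c)).1 < acc.1
              then ((mnP (p.getD lo 0, lo) (fmin p (lo + 1) c)).1,
                    ((mnP (p.getD lo 0, lo) (fmin p (lo + 1) c)).2 : Int)) else acc
    rcases hf : fmin p (lo + 1) c with ⟨rv, rj⟩
    rw [hf] at hlb
    simp only [aInnerF, mnP, Int.ofNat_eq_natCast, PySem.List.pyGetD_natCast]
    split_ifs <;> simp_all <;> first | rfl | omega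

theorem getD_mem (a : List Int) (i : Nat) (h : i < a.length) : a.getD i 0 ∈ a := by
  rw [List.getD_eq_getElem _ _ h]; exact List.getElem_mem _

theorem solAInner_last (p : List Int) (n : Nat) (hn : 0 < n) :
    solAInner p ((n - 1 : Nat) : Int) ((n : Nat) : Int) = (1000000000, -1) := by
  unfold solAInner
  rw [show ((n - 1 : Nat) : Int) + 1 = (n : Int) by omega, PySem.List.pyRange_one_eq_nil (by omega)]
  rfl

theorem solAInner_mid (p : List Int) (i n : Nat) (h : i + 1 < n) :
    solAInner p (i : Int) ((n : Nat) : Int)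
      = if (fmin p (i + 1) (n - i - 2)).1 < 1000000000
          then ((fmin p (i + 1) (n - i - 2)).1, ((fmin p (i + 1) (n - i - 2)).2 : Int))
          else (1000000000, -1) := by
  unfold solAInner
  rw [show ((i : Nat) : Int) + 1 = ((i + 1 : Nat) : Int) by omega, pyRange_natNat (i + 1) n,
      show n - (i + 1) = (n - i - 2) + 1 by omega, afold p (n - i - 2) (i + 1) (1000000000, -1)]

theorem step_eq (n i k : Nat) (a ans : List Int) (hik : i + k + 2 = n)
    (ha : a.length = n) (hb : ∀ x ∈ a, x ≤ 1000000000) :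
    ∃ a' ans', solAStep (a, ans) (i : Int) = (a', ans')
      ∧ solBStep n (ans, a, stBuild n a 0 n) i = (ans', a', stBuild n a' 0 n)
      ∧ a'.length = n ∧ (∀ x ∈ a', x ≤ 1000000000) := by
  have hin : i < n := by omega
  have hilen : i < a.length := by omega
  have hfi := fmin_idx a (n - i - 2) (i + 1)
  have hfv := fmin_val a (n - i - 2) (i + 1)
  have hm2 : (fmin a (i + 1) (n - i - 2)).2 < n := by omega
  have hmmem : (fmin a (i + 1) (n - i - 2)).1 ∈ a := by
    rw [hfv]; exact getD_mem a _ (by omega)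
  have hq : stQuery (stBuild n a 0 n) 0 n (i + 1) n = fmin a (i + 1) (n - i - 2) := by
    rw [stQuery_build a n 0 n (i + 1) n (by omega) (by omega) (by omega)]
    rw [show max (i + 1) 0 = i + 1 by omega, show min n n = n by omega,
        show n - (i + 1) - 1 = n - i - 2 by omega]
  have hai : PySem.List.pyGetD a (i : Int) 0 = a.getD i 0 := PySem.List.pyGetD_natCast a i 0
  have haib : a.getD i 0 ≤ 1000000000 := hb _ (getD_mem a i hilen)
  by_cases hswap : (fmin a (i + 1) (n - i - 2)).1 < a.getD i 0
  · -- both swap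
    have hlt : (fmin a (i + 1) (n - i - 2)).1 < 1000000000 := by omega
    refine ⟨(a.set i (fmin a (i + 1) (n - i - 2)).1).set (fmin a (i + 1) (n - i - 2)).2 (a.getD i 0),
           (ans.set i (ans.getD i 0 + 1)).set (fmin a (i + 1) (n - i - 2)).2
             ((ans.set i (ans.getD i 0 + 1)).getD (fmin a (i + 1) (n - i - 2)).2 0 + 1),
           ?_, ?_, ?_, ?_⟩
    · show solAStep (a, ans) (i : Int) = _
      unfold solAStep
      simp only [ha, solAInner_mid a i n (by omega), if_pos hlt, hai]
      rw [if_pos (by simpa using hswap)]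
      simp only [PySem.List.pySetD_natCast, PySem.List.pyGetD_natCast, hfv]
    · show solBStep n (ans, a, stBuild n a 0 n) i = _
      unfold solBStep
      simp only [hq]
      rw [if_pos (by simpa using hswap)]
      rw [stUpdate_build a n 0 n i ((fmin a (i + 1) (n - i - 2)).1) (by omega) hin (by omega) (by omega),
          stUpdate_build (a.set i (fmin a (i + 1) (n - i - 2)).1) n 0 n
            ((fmin a (i + 1) (n - i - 2)).2) (a.getD i 0) (by omega) hm2 (by omega)
            (by simp [List.length_set]; omega)]
    · simp [List.length_set, ha]
    · intro x hx
      rcases List.mem_or_eq_of_mem_set hx with hx2 | hx2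
      · rcases List.mem_or_eq_of_mem_set hx2 with hx3 | hx3
        · exact hb x hx3
        · subst hx3; exact hb _ hmmem
      · subst hx2; exact haib
  · -- neither swaps
    refine ⟨a, ans, ?_, ?_, ha, hb⟩
    · show solAStep (a, ans) (i : Int) = _
      unfold solAStep
      simp only [ha, solAInner_mid a i n (by omega), hai]
      by_cases hlt : (fmin a (i + 1) (n - i - 2)).1 < 1000000000
      · rw [if_pos hlt, if_neg hswap]
      · rw [if_neg hlt, if_neg (show ¬ a.getD i 0 > 1000000000 by omega)]
    · show solBStep n (ans, a, stBuild n a 0 n) i = _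
      unfold solBStep
      simp only [hq]
      rw [if_neg hswap]

theorem last_step (n : Nat) (a ans : List Int) (hn : 0 < n) (ha : a.length = n)
    (hb : ∀ x ∈ a, x ≤ 1000000000) :
    solAStep (a, ans) ((n - 1 : Nat) : Int) = (a, ans) := by
  unfold solAStep
  simp only [ha, solAInner_last a n hn]
  have h1 : PySem.List.pyGetD a ((n - 1 : Nat) : Int) 0 = a.getD (n - 1) 0 :=
    PySem.List.pyGetD_natCast a (n - 1) 0
  have h2 : a.getD (n - 1) 0 ≤ 1000000000 := hb _ (getD_mem a (n - 1) (by omega))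
  rw [h1, if_neg (show ¬ a.getD (n - 1) 0 > 1000000000 by omega)]

theorem main_loop (n : Nat) : ∀ (k i : Nat) (a ans : List Int),
    i + k + 1 = n → a.length = n → (∀ x ∈ a, x ≤ 1000000000) →
    ((PySem.List.pyRange (i : Int) (n : Int) 1).foldl solAStep (a, ans)).2
      = ((List.range' i k).foldl (solBStep n) (ans, a, stBuild n a 0 n)).1 := by
  intro k
  induction k with
  | zero =>
    intro i a ans hik ha hb
    have hi : i = n - 1 := by omega
    subst hi
    rw [PySem.List.pyRange_one_cons (by omega), List.foldl_cons,
        last_step n a ans (by omega) ha hb,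
        show ((n - 1 : Nat) : Int) + 1 = (n : Int) by omega,
        PySem.List.pyRange_one_eq_nil (by omega)]
    rfl
  | succ k ih =>
    intro i a ans hik ha hb
    obtain ⟨a', ans', hA, hB, ha', hb'⟩ := step_eq n i k a ans (by omega) ha hb
    rw [PySem.List.pyRange_one_cons (by omega), List.foldl_cons, hA,
        show ((i : Nat) : Int) + 1 = ((i + 1 : Nat) : Int) by omega,
        List.range'_succ, List.foldl_cons, hB,
        ih (i + 1) a' ans' (by omega) ha' hb']

theorem final (p : List Int) (hnd : ∀ x ∈ p, x ≤ 1000000000) : solution p = solution_alt p := by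
  unfold solution solution_alt
  by_cases hn : p.length = 0
  · rw [hn]
    rw [show ((0 : Nat) : Int) = (0 : Int) by rfl]
    simp [PySem.List.pyRange_one_eq_nil]
  · simp only [if_neg hn]
    have h := main_loop p.length (p.length - 1) 0 p (List.replicate p.length 0) (by omega) rfl hnd
    norm_num at h
    rw [List.range_eq_range']
    exact h

-- ===== VERDICT (by name: the statement is the Claim_ definition above) =====
theorem solution_spec : Claim_unchanged_solution := by
  intro p _
  unfold Spec_solution D_solution
  intro hnd
  push Not at hnd
  exact final p hnd

theorem solution_changed : Claim_changed_solution := by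
  unfold Claim_changed_solution; decide
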